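-- pv_equiv track=rewrite | github.com/zongwave/PaddleNLP | paddlenlp/transformers/refined_recompute.py | get_pp_vp_split_layers
-- ===== SOURCE A (Python) =====
-- def get_pp_vp_split_layers(layer_num, pp_size, vp_size, skip_recompute_num=-1):
--     """
--     Get the selected layers to skip recompute.
--
--     Args:
--     - skip_recompute_num (int, optional): The number of stages to skip recompute. If not provided or is negative
--       one, it means that all layers should be skipped. Default: -1.
--
--     Returns:
--     - :obj:`set`: A set containing the selected layers to skip recompute.
--
--     """
--
--     assert pp_size > 1, (
--         "Only support pipeline parallel, " f"pp_size must be greater than 1, but got pp_size: {pp_size}"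
--     )
--
--     if skip_recompute_num == -1:
--         # select all layers to skip recompute
--         skip_recompute_num = vp_size
--
--     no_recompute_layer_num = []
--     if skip_recompute_num == 0:
--         return set(no_recompute_layer_num)
--
--     if vp_size == 1:
--         # If vp_size == 1, we can not select model chunk for pp,
--         # so if skip_recompute_num > 0, we select the all layers to skip recompute.
--         if skip_recompute_num > 0:
--             return set(range(layer_num))
--         else:
--             return set()
--
--     assert layer_num % (pp_size * vp_size) == 0, (
--         "layer_num must be divisible by pp_size * vp_size,"
--         f" but got layer_num: {layer_num}, pp_size: {pp_size}, vp_size: {vp_size}"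
--     )
--
--     chunk_size = layer_num // (pp_size * vp_size)
--     chunk_list = [list(range(i * chunk_size, (i + 1) * chunk_size)) for i in range(pp_size * vp_size)]
--
--     stage_chunk_list = [[] for _ in range(pp_size)]
--     for i in range(pp_size * vp_size):
--         stage_chunk_list[i % pp_size].append(chunk_list[i])
--
--     for i in range(pp_size):
--         no_recompute_layer_num.extend(stage_chunk_list[i][-skip_recompute_num:])
--
--     # Convert to 1D list
--     return set(sum(no_recompute_layer_num, []))
-- ===== SOURCE B (Python) =====
-- def get_pp_vp_split_layers(layer_num, pp_size, vp_size, skip_recompute_num=-1):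
--     """Same result as A, computed directly: chunk index c = s + v * pp_size."""
--     assert pp_size > 1, (
--         "Only support pipeline parallel, " f"pp_size must be greater than 1, but got pp_size: {pp_size}"
--     )
--
--     if skip_recompute_num == -1:
--         skip_recompute_num = vp_size
--
--     if skip_recompute_num == 0:
--         return set()
--
--     if vp_size == 1:
--         return set(range(layer_num)) if skip_recompute_num > 0 else set()
--
--     assert layer_num % (pp_size * vp_size) == 0, (
--         "layer_num must be divisible by pp_size * vp_size,"
--         f" but got layer_num: {layer_num}, pp_size: {pp_size}, vp_size: {vp_size}"
--     )
--
--     chunk_size = layer_num // (pp_size * vp_size)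
--     result = set()
--     for s in range(pp_size):
--         for v in range(vp_size)[-skip_recompute_num:]:
--             c = s + v * pp_size
--             result.update(range(c * chunk_size, (c + 1) * chunk_size))
--     return result
-- ===== Notes on version B (the rewrite author's own statement) =====
-- stated objective: simpler
-- what changed: B drops chunk_list, the stage_chunk_list round-robin bucketing and the sum(...,[]) flatten, computing each surviving chunk index directly as c = s + v*pp_size and updating the result set with range(c*chunk_size, (c+1)*chunk_size).
import Mathlib
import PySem

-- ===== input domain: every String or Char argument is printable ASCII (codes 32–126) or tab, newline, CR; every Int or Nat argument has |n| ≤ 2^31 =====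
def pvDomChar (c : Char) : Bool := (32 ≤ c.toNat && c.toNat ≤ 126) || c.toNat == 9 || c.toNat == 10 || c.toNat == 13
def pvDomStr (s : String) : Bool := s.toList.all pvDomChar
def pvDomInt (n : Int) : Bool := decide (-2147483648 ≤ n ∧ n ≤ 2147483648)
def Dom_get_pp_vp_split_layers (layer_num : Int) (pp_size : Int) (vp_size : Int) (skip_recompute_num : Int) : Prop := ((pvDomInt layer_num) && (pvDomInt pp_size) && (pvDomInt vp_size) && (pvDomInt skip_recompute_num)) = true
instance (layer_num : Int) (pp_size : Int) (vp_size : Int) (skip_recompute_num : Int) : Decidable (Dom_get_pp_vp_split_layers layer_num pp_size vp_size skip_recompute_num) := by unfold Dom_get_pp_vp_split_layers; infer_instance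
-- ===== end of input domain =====

-- B replaces A's chunk_list / stage_chunk_list round-robin bucketing and sum(...,[]) flatten by
-- computing the surviving chunk indices arithmetically (c = s + v*pp_size) and updating the result
-- set with each chunk's range directly (objective: simpler).

-- ===== PORT A =====
def get_pp_vp_split_layers (layer_num : Int) (pp_size : Int) (vp_size : Int) (skip_recompute_num : Int) : List Int :=
  -- assert pp_size > 1 : raises outside Pre_
  let skip := if skip_recompute_num = -1 then vp_size else skip_recompute_num
  if skip = 0 then PySem.Set.ofList ([] : List Int)
  else if vp_size = 1 then
    (if skip > 0 then PySem.Set.ofList (PySem.List.pyRange 0 layer_num 1)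
     else PySem.Set.empty)
  else
    -- assert layer_num % (pp_size * vp_size) == 0 : raises outside Pre_
    let chunk_size := PySem.Int.floordiv layer_num (pp_size * vp_size)
    let chunk_list := (PySem.List.pyRange 0 (pp_size * vp_size) 1).map
      (fun i => PySem.List.pyRange (i * chunk_size) ((i + 1) * chunk_size) 1)
    let stage_chunk_list0 : List (List (List Int)) :=
      (PySem.List.pyRange 0 pp_size 1).map (fun _ => [])
    let stage_chunk_list := (PySem.List.pyRange 0 (pp_size * vp_size) 1).foldl
      (fun st i => st.modify (PySem.Int.mod i pp_size).toNat
        (fun b => b ++ [PySem.List.pyGetD chunk_list i []])) stage_chunk_list0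
    let no_recompute_layer_num := (PySem.List.pyRange 0 pp_size 1).foldl
      (fun acc i => acc ++ PySem.List.slice (PySem.List.pyGetD stage_chunk_list i []) (some (-skip)) none) []
    PySem.Set.ofList (no_recompute_layer_num.foldl (fun a b => a ++ b) [])

-- ===== PORT B =====
def get_pp_vp_split_layers_alt (layer_num : Int) (pp_size : Int) (vp_size : Int) (skip_recompute_num : Int) : List Int :=
  let skip := if skip_recompute_num = -1 then vp_size else skip_recompute_num
  if skip = 0 then PySem.Set.empty
  else if vp_size = 1 then
    (if skip > 0 then PySem.Set.ofList (PySem.List.pyRange 0 layer_num 1)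
     else PySem.Set.empty)
  else
    let chunk_size := PySem.Int.floordiv layer_num (pp_size * vp_size)
    (PySem.List.pyRange 0 pp_size 1).foldl (fun result s =>
      (PySem.List.slice (PySem.List.pyRange 0 vp_size 1) (some (-skip)) none).foldl
        (fun result v =>
          PySem.Set.update result
            (PySem.List.pyRange ((s + v * pp_size) * chunk_size) ((s + v * pp_size + 1) * chunk_size) 1))
        result)
      PySem.Set.empty

-- ===== PRECONDITION & SPEC =====
-- Pre_ excludes exactly the inputs on which A raises: pp_size ≤ 1 (AssertionError), and — when the
-- divisibility assert is reached — vp_size = 0 (ZeroDivisionError) or layer_num not divisible by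
-- pp_size * vp_size (AssertionError).
def Pre_get_pp_vp_split_layers (layer_num : Int) (pp_size : Int) (vp_size : Int) (skip_recompute_num : Int) : Prop :=
  pp_size > 1 ∧
    ((if skip_recompute_num = -1 then vp_size else skip_recompute_num) = 0 ∨ vp_size = 1 ∨
      (vp_size ≠ 0 ∧ PySem.Int.mod layer_num (pp_size * vp_size) = 0))
instance (layer_num : Int) (pp_size : Int) (vp_size : Int) (skip_recompute_num : Int) : Decidable (Pre_get_pp_vp_split_layers layer_num pp_size vp_size skip_recompute_num) := by unfold Pre_get_pp_vp_split_layers; infer_instance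

def pvWitness_get_pp_vp_split_layers : Int × Int × Int × Int := (4, 2, 2, 1)

def Spec_get_pp_vp_split_layers (layer_num : Int) (pp_size : Int) (vp_size : Int) (skip_recompute_num : Int) (out : List Int) : Prop := out = get_pp_vp_split_layers_alt layer_num pp_size vp_size skip_recompute_num
instance (layer_num : Int) (pp_size : Int) (vp_size : Int) (skip_recompute_num : Int) (out : List Int) : Decidable (Spec_get_pp_vp_split_layers layer_num pp_size vp_size skip_recompute_num out) := by unfold Spec_get_pp_vp_split_layers; infer_instance

-- ===== CLAIM (what is proved, stated in full; the proofs are below) =====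
def Claim_equal_get_pp_vp_split_layers : Prop := ∀ (layer_num : Int) (pp_size : Int) (vp_size : Int) (skip_recompute_num : Int), Dom_get_pp_vp_split_layers layer_num pp_size vp_size skip_recompute_num → Pre_get_pp_vp_split_layers layer_num pp_size vp_size skip_recompute_num → Spec_get_pp_vp_split_layers layer_num pp_size vp_size skip_recompute_num (get_pp_vp_split_layers layer_num pp_size vp_size skip_recompute_num)

-- ===== LEMMAS AND PROOFS =====

theorem pvFmodPos (a b : Int) (hb : 0 < b) : PySem.Int.mod a b = a % b := by
  show Int.fmod a b = a % b
  rw [Int.fmod_eq_emod]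
  simp [le_of_lt hb]

-- nested fold of folds = fold over the flatMap
theorem pvFoldlFlat {α β γ : Type} (h : γ → β → γ) (g : α → List β) (l : List α) (r0 : γ) :
    l.foldl (fun r x => (g x).foldl h r) r0 = (l.flatMap g).foldl h r0 := by
  induction l generalizing r0 with
  | nil => rfl
  | cons x xs ih => simp [List.flatMap_cons, List.foldl_append, ih]

-- flatten of a flatMap
theorem pvFlattenFlatMap {α β : Type} (g : α → List (List β)) (l : List α) :
    (l.flatMap g).flatten = l.flatMap (fun x => (g x).flatten) := by
  induction l with
  | nil => rfl
  | cons x xs ih => simp [List.flatMap_cons, List.flatten_append, ih]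

-- slice [a:] commutes with map
theorem pvSliceMap {α β : Type} (g : α → β) (xs : List α) (a : Int) :
    PySem.List.slice (xs.map g) (some a) none = (PySem.List.slice xs (some a) none).map g := by
  rw [PySem.List.slice_some_none, PySem.List.slice_some_none, List.length_map, List.map_drop]

-- filter (· % pp = s) of one round range(c, c+pp), c a multiple of pp, is [c + s]
theorem pvFilterRound (pp s c v : Int) (hpp : 0 < pp) (hs0 : 0 ≤ s) (hs : s < pp)
    (hc : c = pp * v) :
    (PySem.List.pyRange c (c + pp) 1).filter (fun i => PySem.Int.mod i pp == s) = [c + s] := by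
  have hmod : ∀ i : Int, c ≤ i → i < c + pp → PySem.Int.mod i pp = i - c := by
    intro i h1 h2
    rw [pvFmodPos _ _ hpp]
    have h3 : i % pp = (i - c) % pp := by
      conv_lhs => rw [show i = (i - c) + pp * v by omega]
      rw [Int.add_mul_emod_self_left]
    rw [h3, Int.emod_eq_of_lt (by omega) (by omega)]
  rw [PySem.List.pyRange_one_append c (c + s) (c + pp) (by omega) (by omega),
      PySem.List.pyRange_one_cons (show c + s < c + pp by omega), List.filter_append]
  have h1 : (PySem.List.pyRange c (c + s) 1).filter (fun i => PySem.Int.mod i pp == s) = [] := by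
    rw [List.filter_eq_nil_iff]
    intro i hi
    have := (PySem.List.mem_pyRange_one).1 hi
    simp only [beq_iff_eq]
    rw [hmod i (by omega) (by omega)]
    omega
  have h2 : (PySem.List.pyRange (c + s + 1) (c + pp) 1).filter (fun i => PySem.Int.mod i pp == s) = [] := by
    rw [List.filter_eq_nil_iff]
    intro i hi
    have := (PySem.List.mem_pyRange_one).1 hi
    simp only [beq_iff_eq]
    rw [hmod i (by omega) (by omega)]
    omega
  rw [h1]
  simp only [List.filter_cons, h2]
  rw [hmod (c + s) (by omega) (by omega)]
  simp

-- filter (· % pp = s) of range(pp*v) is the arithmetic progression s, s+pp, …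
theorem pvFilterMod (pp s : Int) (hpp : 0 < pp) (hs0 : 0 ≤ s) (hs : s < pp) (v : Nat) :
    (PySem.List.pyRange 0 (pp * v) 1).filter (fun i => PySem.Int.mod i pp == s)
      = (PySem.List.pyRange 0 v 1).map (fun j => s + j * pp) := by
  induction v with
  | zero => simp [PySem.List.pyRange_one_eq_nil (le_refl (0 : Int))]
  | succ n ih =>
    have hsplit : PySem.List.pyRange 0 (pp * ((n : Int) + 1)) 1
        = PySem.List.pyRange 0 (pp * n) 1 ++ PySem.List.pyRange (pp * n) (pp * n + pp) 1 := by
      rw [show pp * ((n : Int) + 1) = pp * n + pp by ring]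
      exact PySem.List.pyRange_one_append 0 (pp * n) (pp * n + pp)
        (mul_nonneg (le_of_lt hpp) (by positivity)) (by omega)
    push_cast
    rw [hsplit, List.filter_append, ih, pvFilterRound pp s (pp * n) n hpp hs0 hs rfl,
        PySem.List.pyRange_one_succ_right (by positivity : (0 : Int) ≤ (n : Int)), List.map_append]
    simp [mul_comm]
    omega

-- the bucket fold preserves length
theorem pvFoldLen (pp : Int) {α : Type} (f : Int → α) (l : List Int) (st : List (List α)) :
    (l.foldl (fun st i => st.modify (PySem.Int.mod i pp).toNat (fun b => b ++ [f i])) st).length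
      = st.length := by
  induction l generalizing st with
  | nil => rfl
  | cons x xs ih => simp [ih, List.length_modify]

-- the round-robin bucket fold, characterised pointwise via getD
theorem pvBucketInv (pp : Int) (hpp : 0 < pp) {α : Type} (f : Int → α) (N : Nat)
    (st : List (List α)) (hlen : st.length = pp.toNat) (s : Nat) (hs : s < pp.toNat) :
    (((PySem.List.pyRange 0 (N : Int) 1).foldl
        (fun st i => st.modify (PySem.Int.mod i pp).toNat (fun b => b ++ [f i])) st).getD s [])
      = st.getD s [] ++
        (((PySem.List.pyRange 0 (N : Int) 1).filter (fun i => PySem.Int.mod i pp == (s : Int))).map f) := by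
  induction N with
  | zero =>
    rw [show ((0 : Nat) : Int) = 0 by rfl, PySem.List.pyRange_one_eq_nil (le_refl (0 : Int))]
    simp
  | succ n ih =>
    have hsr : PySem.List.pyRange 0 ((n : Int) + 1) 1 = PySem.List.pyRange 0 (n : Int) 1 ++ [(n : Int)] :=
      PySem.List.pyRange_one_succ_right (by positivity)
    push_cast
    rw [hsr, List.foldl_append, List.filter_append]
    simp only [List.foldl_cons, List.foldl_nil, List.filter_cons, List.filter_nil]
    set prev := (PySem.List.pyRange 0 (n : Int) 1).foldl
        (fun st i => st.modify (PySem.Int.mod i pp).toNat (fun b => b ++ [f i])) st with hprev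
    have hplen : prev.length = pp.toNat := by rw [hprev, pvFoldLen, hlen]
    have hsl : s < prev.length := by omega
    have hm0 : 0 ≤ PySem.Int.mod (n : Int) pp := by
      rw [pvFmodPos _ _ hpp]; exact Int.emod_nonneg _ (by omega)
    have hm1 : PySem.Int.mod (n : Int) pp < pp := by
      rw [pvFmodPos _ _ hpp]; exact Int.emod_lt_of_pos _ hpp
    by_cases hks : (PySem.Int.mod (n : Int) pp).toNat = s
    · have hcond : (PySem.Int.mod (n : Int) pp == (s : Int)) = true := by
        simp only [beq_iff_eq]; omega
      have hget : prev[s] = prev.getD s [] := by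
        rw [List.getD_eq_getElem?_getD, List.getElem?_eq_getElem hsl]; rfl
      rw [List.getD_eq_getElem?_getD, List.getElem?_modify, hks, List.getElem?_eq_getElem hsl]
      simp only [hcond, if_true, List.map_append, List.map_cons, List.map_nil]
      conv_lhs => rw [hget, ih]
      simp [List.getD_eq_getElem?_getD, List.append_assoc]
    · have hcond : (PySem.Int.mod (n : Int) pp == (s : Int)) = false := by
        simp only [beq_eq_false_iff_ne, ne_eq]
        omega
      rw [List.getD_eq_getElem?_getD, List.getElem?_modify]
      simp only [hcond, if_neg hks, Bool.false_eq_true, if_false, List.append_nil]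
      have hid : ((fun a => a) <$> prev[s]?).getD [] = prev.getD s [] := by
        cases h : prev[s]? <;> simp [List.getD_eq_getElem?_getD, h]
      rw [hid]
      exact ih

-- pyRange with a possibly negative upper bound, rewritten to its toNat form
theorem pvRangeToNat (b : Int) : PySem.List.pyRange 0 b 1 = PySem.List.pyRange 0 ((b.toNat : Nat) : Int) 1 := by
  by_cases hb : 0 ≤ b
  · rw [Int.toNat_of_nonneg hb]
  · rw [PySem.List.pyRange_one_eq_nil (by omega), PySem.List.pyRange_one_eq_nil (by omega)]

-- the main branch of A equals the main branch of B, for any chunk size cs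
theorem pvMainBranch (cs pp vp skip : Int) (hpp : 1 < pp) :
    PySem.Set.ofList
      (((PySem.List.pyRange 0 pp 1).foldl
          (fun acc i => acc ++ PySem.List.slice
            (PySem.List.pyGetD
              ((PySem.List.pyRange 0 (pp * vp) 1).foldl
                (fun st i => st.modify (PySem.Int.mod i pp).toNat
                  (fun b => b ++ [PySem.List.pyGetD ((PySem.List.pyRange 0 (pp * vp) 1).map (fun i => PySem.List.pyRange (i * cs) ((i + 1) * cs) 1)) i []]))
                ((PySem.List.pyRange 0 pp 1).map (fun _ => [])))
              i []) (some (-skip)) none) []).foldl (fun a b => a ++ b) [])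
    = (PySem.List.pyRange 0 pp 1).foldl (fun result s =>
        (PySem.List.slice (PySem.List.pyRange 0 vp 1) (some (-skip)) none).foldl
          (fun result v => PySem.Set.update result
            (PySem.List.pyRange ((s + v * pp) * cs) ((s + v * pp + 1) * cs) 1)) result)
        PySem.Set.empty := by
  have hpp0 : (0 : Int) < pp := by omega
  set chunk_list := (PySem.List.pyRange 0 (pp * vp) 1).map (fun i => PySem.List.pyRange (i * cs) ((i + 1) * cs) 1) with hchunk
  set st0 : List (List (List Int)) := (PySem.List.pyRange 0 pp 1).map (fun _ => []) with hst0
  -- rewrite the B side as ofList of a flatMap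
  have hinner : (fun (result : PySem.Set Int) (s : Int) =>
      (PySem.List.slice (PySem.List.pyRange 0 vp 1) (some (-skip)) none).foldl
        (fun result v => PySem.Set.update result (PySem.List.pyRange ((s + v * pp) * cs) ((s + v * pp + 1) * cs) 1)) result)
      = fun result s => ((PySem.List.slice (PySem.List.pyRange 0 vp 1) (some (-skip)) none).flatMap
          (fun v => PySem.List.pyRange ((s + v * pp) * cs) ((s + v * pp + 1) * cs) 1)).foldl PySem.Set.add result := by
    funext r s
    rw [← pvFoldlFlat]
    rfl
  rw [hinner, pvFoldlFlat]
  show PySem.Set.ofList _ = PySem.Set.ofList ((PySem.List.pyRange 0 pp 1).flatMap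
      (fun s => (PySem.List.slice (PySem.List.pyRange 0 vp 1) (some (-skip)) none).flatMap
        (fun v => PySem.List.pyRange ((s + v * pp) * cs) ((s + v * pp + 1) * cs) 1)))
  apply congrArg
  -- A's list: fold-append to flatMap, then flatten
  rw [show (fun (a b : List Int) => a ++ b) = (fun acc x => acc ++ id x) from rfl]
  rw [PySem.List.foldl_append_eq_flatMap, PySem.List.foldl_append_eq_flatMap]
  simp only [List.nil_append, List.flatMap_id]
  rw [pvFlattenFlatMap]
  apply List.flatMap_congr
  intro s hsmem
  obtain ⟨hs0, hslt⟩ := (PySem.List.mem_pyRange_one).1 hsmem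
  -- the bucket at stage s
  have hlen0 : st0.length = pp.toNat := by
    simp [hst0, PySem.List.length_pyRange_one]
  have hsN : s.toNat < pp.toNat := by omega
  have hb := pvBucketInv pp hpp0 (fun i => PySem.List.pyGetD chunk_list i []) ((pp * vp).toNat)
      st0 hlen0 s.toNat hsN
  simp only [] at hb
  have hbase : st0.getD s.toNat [] = [] := by
    rw [hst0, List.getD_eq_getElem?_getD, List.getElem?_map]
    cases h : (PySem.List.pyRange 0 pp 1)[s.toNat]? <;> simp
  have hsInt : ((s.toNat : Nat) : Int) = s := by omega
  have hbound : (((pp * vp).toNat : Nat) : Int) = pp * ((vp.toNat : Nat) : Int) := by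
    by_cases hv : 0 ≤ vp
    · rw [Int.toNat_of_nonneg hv, Int.toNat_of_nonneg (mul_nonneg (le_of_lt hpp0) hv)]
    · rw [show vp.toNat = 0 by omega, show (pp * vp).toNat = 0 by
        have : pp * vp < 0 := mul_neg_of_pos_of_neg hpp0 (by omega)
        omega]
      simp
  have hstage : PySem.List.pyGetD
      ((PySem.List.pyRange 0 (pp * vp) 1).foldl
        (fun st i => st.modify (PySem.Int.mod i pp).toNat
          (fun b => b ++ [PySem.List.pyGetD chunk_list i []])) st0) s []
      = ((PySem.List.pyRange 0 ((vp.toNat : Nat) : Int) 1).map (fun j => s + j * pp)).map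
          (fun i => PySem.List.pyGetD chunk_list i []) := by
    rw [PySem.List.pyGetD_of_nonneg _ _ hs0, pvRangeToNat (pp * vp), hb, hbase, List.nil_append,
        hsInt, hbound, pvFilterMod pp s hpp0 hs0 hslt vp.toNat]
  rw [hstage, List.map_map, pvSliceMap, pvRangeToNat vp]
  rw [← List.flatMap_def]
  apply List.flatMap_congr
  intro j hjmem
  obtain ⟨hj0, hjlt⟩ := (PySem.List.mem_pyRange_one).1 (PySem.List.mem_of_mem_slice _ _ _ hjmem)
  have hvp1 : ((vp.toNat : Nat) : Int) = vp := by omega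
  have harg0 : 0 ≤ s + j * pp := by positivity
  have harglt : s + j * pp < pp * vp := by nlinarith [hvp1, hjlt]
  show PySem.List.pyGetD chunk_list (s + j * pp) [] = _
  rw [hchunk, PySem.List.pyGetD_map_pyRange_of_nonneg _ (pp * vp) _ _ harg0 harglt]

-- ===== VERDICT (by name: the statement is the Claim_ definition above) =====
theorem get_pp_vp_split_layers_spec : Claim_equal_get_pp_vp_split_layers := by
  intro layer_num pp_size vp_size skip_recompute_num _hdom hpre
  obtain ⟨hpp, _hrest⟩ := hpre
  unfold Spec_get_pp_vp_split_layers get_pp_vp_split_layers get_pp_vp_split_layers_alt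
  by_cases h0 : (if skip_recompute_num = -1 then vp_size else skip_recompute_num) = 0
  · simp only [h0]
    rfl
  · simp only [if_neg h0]
    by_cases h1 : vp_size = 1
    · simp only [h1]
      rfl
    · simp only [if_neg h1]
      exact pvMainBranch (PySem.Int.floordiv layer_num (pp_size * vp_size)) pp_size vp_size
        (if skip_recompute_num = -1 then vp_size else skip_recompute_num) hpp
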